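-- pv_equiv track=rewrite | github.com/rolandjansky/athena | Trigger/TrigTools/TrigByteStreamTools/python/CTPfragment.py | decodeTriggerBits
-- ===== SOURCE A (Python) =====
-- def decodeTriggerBits(info):
--    """Return list of bits [0,1,1,0,...] from list of 32-bit trigger words"""
--    if type(info)==int:
--       info=[info]
--    bits=[]
--    cnt=0
--    for word in info:
--       for i in range(32):
--          if word&(1<<i):
--             bits+=[cnt]
--          cnt+=1
--    return bits
-- ===== SOURCE B (Python) =====
-- _TABLE = [[i for i in range(8) if (b >> i) & 1] for b in range(256)]
--
-- def decodeTriggerBits(info):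
--    """Return list of bits [0,1,1,0,...] from list of 32-bit trigger words"""
--    if type(info)==int:
--       info=[info]
--    bits=[]
--    for k, word in enumerate(info):
--       w = word & 0xFFFFFFFF
--       for j in range(4):
--          base = 32*k + 8*j
--          for p in _TABLE[(w >> (8*j)) & 0xFF]:
--             bits.append(base + p)
--    return bits
-- ===== Notes on version B (the rewrite author's own statement) =====
-- stated objective: faster
-- what changed: A scans all 32 bit positions of every word with a shifting mask and a global per-bit counter; B precomputes once a 256-entry table of set-bit positions per byte, splits each masked word into its 4 bytes and emits the looked-up positions shifted by a base offset computed from the enumerate index.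
import Mathlib
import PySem

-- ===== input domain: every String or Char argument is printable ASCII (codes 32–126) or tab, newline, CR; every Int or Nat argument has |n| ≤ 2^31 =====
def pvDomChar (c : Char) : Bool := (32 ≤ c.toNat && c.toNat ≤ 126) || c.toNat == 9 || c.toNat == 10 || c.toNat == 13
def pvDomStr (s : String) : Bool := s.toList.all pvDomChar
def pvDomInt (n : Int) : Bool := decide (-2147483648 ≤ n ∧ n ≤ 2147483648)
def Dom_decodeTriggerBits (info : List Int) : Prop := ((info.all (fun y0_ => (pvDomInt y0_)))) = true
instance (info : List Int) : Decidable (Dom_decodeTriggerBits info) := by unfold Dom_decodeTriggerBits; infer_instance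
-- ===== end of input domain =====

-- B (alternative): instead of testing all 32 positions of every word against a shifting
-- mask with a running counter, B precomputes once a 256-entry table of set-bit positions
-- per byte, splits each masked word into its 4 bytes, and emits the looked-up positions
-- shifted by the byte's base offset computed from the enumerate index.

-- ===== PORT A =====
def decodeTriggerBits (info : List Int) : List Int :=
  (info.foldl (fun (st : List Int × Int) word =>
      (PySem.List.pyRange 0 32 1).foldl (fun (st : List Int × Int) i =>
        let st' := if PySem.Int.band word ((1 : Int) <<< i) ≠ 0 then (st.1 ++ [st.2], st.2) else st
        (st'.1, st'.2 + 1)) st) ([], 0)).1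

-- ===== PORT B =====
-- _TABLE = [[i for i in range(8) if (b >> i) & 1] for b in range(256)]
def pvTable : List (List Nat) :=
  (List.range 256).map (fun b => (List.range 8).filter (fun i => (b >>> i) &&& 1 != 0))

def decodeTriggerBits_alt (info : List Int) : List Int :=
  (PySem.List.enumerate info 0).foldl (fun bits kw =>
    let w : Nat := (PySem.Int.band kw.2 4294967295).toNat
    (List.range 4).foldl (fun bits (j : Nat) =>
      let base : Int := 32 * kw.1 + 8 * (j : Int)
      bits ++ (pvTable.getD ((w >>> (8*j)) &&& 255) []).map (fun (p : Nat) => base + (p : Int))) bits) []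

-- ===== PRECONDITION & SPEC =====
def Spec_decodeTriggerBits (info : List Int) (out : List Int) : Prop := out = decodeTriggerBits_alt info
instance (info : List Int) (out : List Int) : Decidable (Spec_decodeTriggerBits info out) := by unfold Spec_decodeTriggerBits; infer_instance

-- ===== CLAIM (what is proved, stated in full; the proofs are below) =====
def Claim_equal_decodeTriggerBits : Prop := ∀ (info : List Int), Dom_decodeTriggerBits info → Spec_decodeTriggerBits info (decodeTriggerBits info)

-- ===== LEMMAS AND PROOFS =====

-- the masked word, as a natural number (w = word & 0xFFFFFFFF)
def pvMask (word : Int) : Nat := (PySem.Int.band word 4294967295).toNat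

-- canonical value: per word, the set-bit positions of the masked word, offset by cnt
def pvC : List Int → Int → List Int
  | [], _ => []
  | w :: ws, cnt =>
      ((List.range 32).filter (pvMask w).testBit).map (fun (n : Nat) => cnt + (n : Int)) ++ pvC ws (cnt + 32)

lemma pv_range32 : PySem.List.pyRange 0 32 1 = (List.range 32).map Int.ofNat := by decide

lemma pv_band_pos (m c : Nat) : PySem.Int.band (Int.ofNat m) (Int.ofNat c) = Int.ofNat (m &&& c) :=
  PySem.Int.band_natCast m c

lemma pv_band_neg (m c : Nat) :
    PySem.Int.band (Int.negSucc m) (Int.ofNat c) = Int.ofNat (c - (c &&& m)) := by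
  simp only [PySem.Int.band]
  norm_num

lemma pv_lit : (4294967295 : Int) = Int.ofNat 4294967295 := rfl

lemma pv_toNat (n : Nat) : (Int.ofNat n).toNat = n := rfl

lemma pv_shift (i : Nat) : (1 : Int) <<< (Int.ofNat i) = Int.ofNat (2^i) := by
  have h : (1 : Int) <<< (Int.ofNat i) = ((Nat.shiftLeft' false 1 i : Nat) : Int) := rfl
  rw [h, Nat.shiftLeft'_false, Nat.shiftLeft_eq, one_mul]
  rfl

-- complement within k bits, as a subtraction
lemma pv_compl_testBit : ∀ (k y : Nat), y < 2^k → ∀ i, i < k →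
    ((2^k - 1) - y).testBit i = !y.testBit i := by
  intro k
  induction k with
  | zero => intro y _ i hi; omega
  | succ j ih =>
    intro y hy i hi
    have h2 : 2^(j+1) = 2 * 2^j := by ring
    cases i with
    | zero =>
      simp only [Nat.testBit_zero]
      have : (2^(j+1) - 1 - y) % 2 = 1 - y % 2 := by omega
      rw [this]
      rcases Nat.mod_two_eq_zero_or_one y with h | h <;> simp [h]
    | succ i =>
      rw [Nat.testBit_add_one, Nat.testBit_add_one]
      have hdiv : (2^(j+1) - 1 - y) / 2 = (2^j - 1) - y / 2 := by omega
      rw [hdiv, ih (y / 2) (by omega) i (by omega)]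

-- the key per-bit fact: A's test on the raw word equals bit i of B's masked word
lemma pv_test_eq (word : Int) (i : Nat) (hi : i < 32) :
    decide (PySem.Int.band word ((1 : Int) <<< (Int.ofNat i)) ≠ 0)
      = (pvMask word).testBit i := by
  have hmask : (4294967295 : Nat) = 2^32 - 1 := by norm_num
  unfold pvMask
  rcases word with m | m
  · rw [pv_shift, pv_lit, pv_band_pos, pv_band_pos, pv_toNat]
    rw [hmask, Nat.and_two_pow_sub_one_eq_mod, Nat.testBit_mod_two_pow, Nat.and_two_pow]
    cases h : m.testBit i <;>
      simp [hi, Int.ofNat_eq_natCast]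
  · rw [pv_shift, pv_lit, pv_band_neg, pv_band_neg, pv_toNat]
    have hand : (2^i &&& m) = (m.testBit i).toNat * 2^i := by
      rw [Nat.and_comm, Nat.and_two_pow]
    have hm : ((4294967295 - (4294967295 &&& m) : Nat)).testBit i = !m.testBit i := by
      rw [hmask, Nat.and_comm, Nat.and_two_pow_sub_one_eq_mod]
      rw [pv_compl_testBit 32 (m % 2^32) (Nat.mod_lt _ (by norm_num)) i hi]
      rw [Nat.testBit_mod_two_pow]
      simp [hi]
    rw [hm, hand]
    cases h : m.testBit i
    · simp [Int.ofNat_eq_natCast]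
    · simp [Int.ofNat_eq_natCast]

-- A's inner 32-step scan, characterised
lemma pv_innerA (word : Int) : ∀ (k : Nat) (bits : List Int) (cnt : Int),
    ((List.range k).map Int.ofNat).foldl
      (fun (st : List Int × Int) i =>
        let st' := if PySem.Int.band word ((1 : Int) <<< i) ≠ 0 then (st.1 ++ [st.2], st.2) else st
        (st'.1, st'.2 + 1)) (bits, cnt)
    = (bits ++ ((List.range k).filter
          (fun (n : Nat) => decide (PySem.Int.band word ((1 : Int) <<< (Int.ofNat n)) ≠ 0))).map (fun (n : Nat) => cnt + (n : Int)),
       cnt + k) := by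
  intro k
  induction k with
  | zero => intro bits cnt; simp
  | succ k ih =>
    intro bits cnt
    rw [List.range_succ, List.map_append, List.foldl_append, ih, List.filter_append]
    simp only [List.map_cons, List.map_nil, List.foldl_cons, List.foldl_nil,
               List.filter_cons, List.filter_nil]
    by_cases h : PySem.Int.band word ((1 : Int) <<< (Int.ofNat k)) ≠ 0
    · rw [if_pos h]
      simp only [Prod.mk.injEq]
      refine ⟨?_, by push_cast; ring⟩
      rw [decide_eq_true h]
      simp
    · rw [if_neg h]
      simp only [Prod.mk.injEq]
      refine ⟨?_, by push_cast; ring⟩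
      rw [decide_eq_false h]
      simp

-- A's whole fold, characterised by pvC
lemma pv_A_char : ∀ (info : List Int) (bits : List Int) (cnt : Int),
    (info.foldl (fun (st : List Int × Int) word =>
      (PySem.List.pyRange 0 32 1).foldl (fun (st : List Int × Int) i =>
        let st' := if PySem.Int.band word ((1 : Int) <<< i) ≠ 0 then (st.1 ++ [st.2], st.2) else st
        (st'.1, st'.2 + 1)) st) (bits, cnt))
    = (bits ++ pvC info cnt, cnt + 32 * info.length) := by
  intro info
  induction info with
  | nil => intro bits cnt; simp [pvC]
  | cons w ws ih =>
    intro bits cnt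
    simp only [pv_range32] at ih ⊢
    rw [List.foldl_cons, pv_innerA w 32 bits cnt, ih, pvC]
    have hf : (List.range 32).filter
          (fun (n : Nat) => decide (PySem.Int.band w ((1 : Int) <<< (Int.ofNat n)) ≠ 0))
        = (List.range 32).filter (pvMask w).testBit := by
      apply List.filter_congr
      intro n hn
      exact pv_test_eq w n (List.mem_range.mp hn)
    rw [hf, List.append_assoc]
    refine Prod.ext ?_ ?_ <;> push_cast
    · rfl
    · simp only [List.length_cons]; push_cast; ring

-- table lookup: entry v (< 256) lists the set bits of v
lemma pv_table_getD (v : Nat) (hv : v < 256) :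
    pvTable.getD v [] = (List.range 8).filter v.testBit := by
  unfold pvTable
  rw [List.getD_eq_getElem?_getD, List.getElem?_map, List.getElem?_range hv]
  simp only [Option.map_some, Option.getD_some]
  apply List.filter_congr
  intro i _
  simp [Nat.testBit, Nat.and_comm]

-- bit i of a byte extracted from x is bit 8*j+i of x
lemma pv_byte_testBit (x j i : Nat) (hi : i < 8) :
    ((x >>> (8*j)) &&& 255).testBit i = x.testBit (8*j + i) := by
  have h255 : (255 : Nat) = 2^8 - 1 := by norm_num
  rw [h255, Nat.and_two_pow_sub_one_eq_mod, Nat.testBit_mod_two_pow, Nat.testBit_shiftRight]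
  simp [hi]

-- B's inner 4-byte fold, characterised
lemma pv_innerB (w : Nat) (k : Int) : ∀ (t : Nat) (bits : List Int),
    (List.range t).foldl (fun bits (j : Nat) =>
        bits ++ (pvTable.getD ((w >>> (8*j)) &&& 255) []).map
          (fun (p : Nat) => (32 * k + 8 * (j : Int)) + (p : Int))) bits
    = bits ++ ((List.range (8*t)).filter w.testBit).map (fun (n : Nat) => 32 * k + (n : Int)) := by
  intro t
  induction t with
  | zero => intro bits; simp
  | succ t ih =>
    intro bits
    rw [List.range_succ, List.foldl_append, ih, List.foldl_cons, List.foldl_nil]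
    have hb : (w >>> (8*t)) &&& 255 < 256 := by
      have := Nat.and_le_right (n := w >>> (8*t)) (m := 255)
      omega
    rw [pv_table_getD _ hb]
    have hfilter : (List.range 8).filter ((w >>> (8*t)) &&& 255).testBit
        = (List.range 8).filter (fun i => w.testBit (8*t + i)) := by
      apply List.filter_congr
      intro i hi
      rw [pv_byte_testBit w t i (List.mem_range.mp hi)]
    rw [hfilter]
    have hrange : 8 * (t + 1) = 8 * t + 8 := by ring
    rw [hrange, List.range_add, List.filter_append, List.map_append, ← List.append_assoc]
    congr 1
    rw [List.filter_map, List.map_map]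
    apply List.map_congr_left
    intro i hi
    have hi8 : i ∈ List.range 8 := (List.mem_filter.mp hi).1
    simp only [Function.comp]
    push_cast
    ring

-- B's whole fold over enumerate, characterised by pvC
lemma pv_B_char : ∀ (info : List Int) (k : Int) (bits : List Int),
    (PySem.List.enumerate info k).foldl (fun bits kw =>
      let w : Nat := (PySem.Int.band kw.2 4294967295).toNat
      (List.range 4).foldl (fun bits (j : Nat) =>
        let base : Int := 32 * kw.1 + 8 * (j : Int)
        bits ++ (pvTable.getD ((w >>> (8*j)) &&& 255) []).map (fun (p : Nat) => base + (p : Int))) bits) bits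
    = bits ++ pvC info (32 * k) := by
  intro info
  induction info with
  | nil => intro k bits; simp [PySem.List.enumerate_nil, pvC]
  | cons w ws ih =>
    intro k bits
    rw [PySem.List.enumerate_cons, List.foldl_cons]
    show (PySem.List.enumerate ws (k+1)).foldl _
        ((List.range 4).foldl (fun bits j =>
          bits ++ (pvTable.getD (((pvMask w) >>> (8*j)) &&& 255) []).map
            (fun (p : Nat) => (32 * k + 8 * (j : Int)) + (p : Int))) bits) = _
    rw [pv_innerB (pvMask w) k 4 bits, ih, pvC, List.append_assoc]
    congr 2
    ring_nf

-- ===== VERDICT (by name: the statement is the Claim_ definition above) =====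
theorem decodeTriggerBits_spec : Claim_equal_decodeTriggerBits := by
  intro info _
  unfold Spec_decodeTriggerBits decodeTriggerBits decodeTriggerBits_alt
  rw [pv_A_char info [] 0, pv_B_char info 0 []]
  simp
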